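-- pv_equiv track=rewrite | github.com/automl/DeepCAVE | deepcave/utils/layout.py | get_slider_marks
-- ===== SOURCE A (Python) =====
-- from typing import Any, Dict, List, Optional, Union
--
-- def get_slider_marks(
--     strings: Optional[List[Any]] = None,
--     steps: int = 10,
--     access_all: bool = False,
-- ) -> Dict[int, Dict[str, str]]:
--     """
--     Generate a dictionary containing slider marks.
--
--     The slider marks are based on the provided list of dictionaries.
--
--     Parameters
--     ----------
--     strings : Optional[List[Dict[str, Any]]], optional
--         List of dictionaries containing information about the marks.
--         Default value is None.
--     steps : int, optional
--         Number of steps or marks on the slider.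
--         Default is 10.
--     access_all : bool, optional
--         Indicates whether to create marks for all items.
--         Default is False.
--
--     Returns
--     -------
--     Dict[int, Dict[str, str]]
--         Contains information about the positions and labels of the marks.
--     """
--     marks = {}
--     if strings is None:
--         marks[0] = {"label": "None"}
--         return marks
--
--     if len(strings) < steps:
--         steps = len(strings)
--
--     for i, string in enumerate(strings):
--         if i % int(len(strings) / steps) == 0:
--             marks[i] = {"label": str(string)}
--         else:
--             if access_all:
--                 marks[i] = {"label": ""}
--
--     # Also include the last mark
--     marks[len(strings) - 1] = {"label": str(strings[-1])}
--
--     return marks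
-- ===== SOURCE B (Python) =====
-- def get_slider_marks(
--     strings=None,
--     steps: int = 10,
--     access_all: bool = False,
-- ):
--     """Alternative decomposition: pre-fill (if access_all) and write labeled marks
--     directly at stride |k| instead of testing divisibility per index."""
--     if strings is None:
--         return {0: {"label": "None"}}
--     n = len(strings)
--     k = abs(int(n / min(steps, n)))
--     if access_all:
--         marks = {i: {"label": ""} for i in range(n)}
--     else:
--         marks = {}
--     for i in range(0, n, k):
--         marks[i] = {"label": str(strings[i])}
--     marks[n - 1] = {"label": str(strings[n - 1])}
--     return marks
-- ===== Notes on version B (the rewrite author's own statement) =====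
-- stated objective: alternative
-- what changed: Instead of scanning every index and testing i % k == 0, B computes the stride k once, pre-fills empty labels only when access_all, and writes the labeled marks directly with range(0, n, k); equivalence is proved on inputs where A returns (nonempty list with a nonzero stride, or strings=None).
import Mathlib
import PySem

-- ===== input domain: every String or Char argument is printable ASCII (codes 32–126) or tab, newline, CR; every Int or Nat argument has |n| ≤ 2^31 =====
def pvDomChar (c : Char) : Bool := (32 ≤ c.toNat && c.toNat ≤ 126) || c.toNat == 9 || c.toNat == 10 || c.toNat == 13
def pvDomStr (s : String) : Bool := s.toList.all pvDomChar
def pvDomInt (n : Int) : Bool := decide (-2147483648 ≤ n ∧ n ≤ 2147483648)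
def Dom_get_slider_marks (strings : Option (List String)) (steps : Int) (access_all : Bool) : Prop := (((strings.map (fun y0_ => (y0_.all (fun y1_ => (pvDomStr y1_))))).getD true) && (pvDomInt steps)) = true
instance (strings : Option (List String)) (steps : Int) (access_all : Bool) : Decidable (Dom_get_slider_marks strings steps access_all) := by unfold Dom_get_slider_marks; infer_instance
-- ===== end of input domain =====

-- B replaces A's per-index divisibility test with direct strided writes (a different
-- decomposition of the same task, similar cost); return values only, nothing is mutated.

-- ===== PORT A =====
-- Note: Python's 'int(len(strings) / steps)' is float division truncated toward zero; on the
-- stated domain (|len|, |steps| ≤ 2^31) that equals exact truncated division, ported as Int.tdiv.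
def get_slider_marks (strings : Option (List String)) (steps : Int) (access_all : Bool) : List (Int × List (String × String)) :=
  match strings with
  | none => (PySem.Dict.insert PySem.Dict.empty (0 : Int) [("label", "None")]).items
  | some l =>
    let steps : Int := if PySem.List.len l < steps then PySem.List.len l else steps
    let marks : PySem.Dict Int (List (String × String)) :=
      (PySem.List.enumerate l).foldl (fun marks p =>
        if PySem.Int.mod p.1 (Int.tdiv (PySem.List.len l) steps) = 0 then
          marks.insert p.1 [("label", p.2)]
        else if access_all then
          marks.insert p.1 [("label", "")]
        else marks) PySem.Dict.empty
    (marks.insert (PySem.List.len l - 1) [("label", PySem.List.pyGetD l (-1) "")]).items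

-- ===== PORT B =====
def get_slider_marks_alt (strings : Option (List String)) (steps : Int) (access_all : Bool) : List (Int × List (String × String)) :=
  match strings with
  | none => (PySem.Dict.ofList [((0 : Int), [("label", "None")])]).items
  | some l =>
    let n : Int := PySem.List.len l
    let k : Int := ((Int.tdiv n (min steps n)).natAbs : Int)
    let marks : PySem.Dict Int (List (String × String)) :=
      if access_all then
        (PySem.List.pyRange 0 n 1).foldl (fun d i => d.insert i [("label", "")]) PySem.Dict.empty
      else PySem.Dict.empty
    let marks := (PySem.List.pyRange 0 n k).foldl
      (fun d i => d.insert i [("label", PySem.List.pyGetD l i "")]) marks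
    (marks.insert (n - 1) [("label", PySem.List.pyGetD l (n - 1) "")]).items

-- ===== PRECONDITION & SPEC =====
-- Pre_ excludes exactly the inputs where Python A raises: an empty list (IndexError on
-- strings[-1]) and a nonempty list whose truncated stride int(n / min(steps, n)) is 0
-- (ZeroDivisionError in 'i % int(...)', e.g. steps = 0 or steps < -len(strings)).
def Pre_get_slider_marks (strings : Option (List String)) (steps : Int) (access_all : Bool) : Prop :=
  (strings.elim true (fun l =>
    decide (l ≠ [] ∧ Int.tdiv (PySem.List.len l) (min steps (PySem.List.len l)) ≠ 0))) = true
instance (strings : Option (List String)) (steps : Int) (access_all : Bool) : Decidable (Pre_get_slider_marks strings steps access_all) := by unfold Pre_get_slider_marks; infer_instance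

def pvWitness_get_slider_marks : Option (List String) × Int × Bool := (some ["a", "b", "c"], 2, false)

def Spec_get_slider_marks (strings : Option (List String)) (steps : Int) (access_all : Bool) (out : List (Int × List (String × String))) : Prop := out = get_slider_marks_alt strings steps access_all
instance (strings : Option (List String)) (steps : Int) (access_all : Bool) (out : List (Int × List (String × String))) : Decidable (Spec_get_slider_marks strings steps access_all out) := by unfold Spec_get_slider_marks; infer_instance

-- ===== CLAIM (what is proved, stated in full; the proofs are below) =====
def Claim_equal_get_slider_marks : Prop := ∀ (strings : Option (List String)) (steps : Int) (access_all : Bool), Dom_get_slider_marks strings steps access_all → Pre_get_slider_marks strings steps access_all → Spec_get_slider_marks strings steps access_all (get_slider_marks strings steps access_all)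

-- ===== LEMMAS AND PROOFS =====

-- range(0, n, k) enumerates exactly the multiples of k below n, in increasing order

theorem pv_pyRange_filter (n k : Nat) (hk : 0 < k) :
    PySem.List.pyRange 0 (n : Int) (k : Int) =
      ((List.range n).filter (fun i : Nat => decide ((k : Int) ∣ (i : Int)))).map (fun i : Nat => (i : Int)) := by
  have hkI : (0:Int) < (k:Int) := by exact_mod_cast hk
  have hmemL : ∀ x : Int, x ∈ PySem.List.pyRange 0 (n:Int) (k:Int) ↔ (0 ≤ x ∧ x < n ∧ (k:Int) ∣ x) := by
    intro x
    rw [PySem.List.mem_pyRange_iff_of_pos hkI]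
    simp
  have hmemR : ∀ x : Int, x ∈ ((List.range n).filter (fun i : Nat => decide ((k : Int) ∣ (i : Int)))).map (fun i : Nat => (i : Int)) ↔ (0 ≤ x ∧ x < n ∧ (k:Int) ∣ x) := by
    intro x
    simp only [List.mem_map, List.mem_filter, List.mem_range, decide_eq_true_eq]
    constructor
    · rintro ⟨i, ⟨hi, hd⟩, rfl⟩
      refine ⟨by omega, by exact_mod_cast hi, hd⟩
    · rintro ⟨h0, hlt, hd⟩
      refine ⟨x.toNat, ⟨by omega, by rwa [Int.toNat_of_nonneg h0]⟩, Int.toNat_of_nonneg h0⟩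
  have hpwL : (PySem.List.pyRange 0 (n:Int) (k:Int)).Pairwise (· < ·) := by
    rw [PySem.List.pyRange_of_pos _ _ hkI]
    refine List.Pairwise.map _ ?_ (List.pairwise_lt_range)
    intro a b hab
    have : (a:Int) < (b:Int) := by exact_mod_cast hab
    nlinarith
  have hpwR : (((List.range n).filter (fun i : Nat => decide ((k : Int) ∣ (i : Int)))).map (fun i : Nat => (i : Int))).Pairwise (· < ·) := by
    refine List.Pairwise.map _ ?_ ((List.pairwise_lt_range (n := n)).sublist (List.filter_sublist (l := List.range n) (p := fun i : Nat => decide ((k : Int) ∣ (i : Int)))))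
    intro a b hab
    exact_mod_cast hab
  have hperm : (PySem.List.pyRange 0 (n:Int) (k:Int)).Perm
      (((List.range n).filter (fun i : Nat => decide ((k : Int) ∣ (i : Int)))).map (fun i : Nat => (i : Int))) := by
    apply List.perm_of_nodup_nodup_toFinset_eq hpwL.nodup hpwR.nodup
    ext x
    simp only [List.mem_toFinset]
    rw [hmemL, hmemR]
  exact PySem.List.eq_of_perm_of_pairwise_le_of_injective (fun x => x) (fun a b h => h) hperm
    (hpwL.imp le_of_lt) (hpwR.imp le_of_lt)


-- inserting at keys that are already present replaces values in place
theorem pv_foldl_insert_replace {ν : Type} (n : Nat) (v : Int → ν) (M : List Int) :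
    ∀ (d : PySem.Dict Int ν) (g : Nat → ν),
      (∀ m ∈ M, ∃ j : Nat, j < n ∧ m = (j : Int)) →
      d.items = (List.range n).map (fun i : Nat => ((i : Int), g i)) →
      (M.foldl (fun d i => d.insert i (v i)) d).items =
        (List.range n).map (fun i : Nat => ((i : Int), if (i : Int) ∈ M then v (i : Int) else g i)) := by
  induction M with
  | nil => intro d g _ hd; simpa using hd
  | cons m M' ih =>
    intro d g hM hd
    obtain ⟨j, hj, rfl⟩ := hM _ (List.mem_cons_self)
    have hc : d.contains (j : Int) = true := by
      rw [PySem.Dict.contains_eq_decide_mem_keys]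
      simp only [PySem.Dict.keys, hd, List.map_map, decide_eq_true_eq]
      exact List.mem_map.2 ⟨j, List.mem_range.2 hj, rfl⟩
    have hins : (d.insert (j : Int) (v j)).items =
        (List.range n).map (fun i : Nat => ((i : Int), if i = j then v (j : Int) else g i)) := by
      rw [PySem.Dict.items_insert_of_contains _ _ hc, hd, List.map_map]
      refine List.map_congr_left ?_
      intro i _
      by_cases h : i = j <;> simp [h]
    rw [List.foldl_cons,
      ih (d.insert (j : Int) (v j)) (fun i => if i = j then v (j : Int) else g i)
        (fun m hm => hM m (List.mem_cons_of_mem _ hm)) hins]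
    refine List.map_congr_left ?_
    intro i hi
    by_cases h1 : (i : Int) ∈ M'
    · simp [h1, List.mem_cons]
    · by_cases h2 : i = j
      · subst h2; simp [h1, List.mem_cons]
      · have : ¬ (i : Int) ∈ (j : Int) :: M' := by
          simp only [List.mem_cons]
          push Not
          exact ⟨by exact_mod_cast h2, h1⟩
        simp [h1, h2, this]

theorem pv_main (l : List String) (steps : Int) (access_all : Bool) (hne : l ≠ [])
    (hkd : Int.tdiv (PySem.List.len l) (min steps (PySem.List.len l)) ≠ 0) :
    get_slider_marks (some l) steps access_all = get_slider_marks_alt (some l) steps access_all := by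
  have hs : (if (PySem.List.len l) < steps then (PySem.List.len l) else steps)
      = min steps (PySem.List.len l) := by
    rw [Int.min_def]; split_ifs <;> omega
  set k' : Int := Int.tdiv (PySem.List.len l) (min steps (PySem.List.len l)) with hk'def
  set k : Nat := k'.natAbs with hkdef
  have hk : 0 < k := by
    have := Int.natAbs_eq_zero (a := k')
    omega
  have hdvd : ∀ i : Int, (PySem.Int.mod i k' = 0) ↔ ((k : Int) ∣ i) := by
    intro i
    rw [PySem.Int.mod_eq_zero_iff_dvd, hkdef, Int.natAbs_dvd]
  have hn : 0 < l.length := List.length_pos_iff.2 hne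
  -- the last value is the same
  have hlast : PySem.List.pyGetD l (-1) "" = PySem.List.pyGetD l (PySem.List.len l - 1) "" := by
    have h1 : PySem.List.len l - 1 = ((l.length - 1 : Nat) : Int) := by
      simp [PySem.List.len_eq]; omega
    rw [PySem.List.pyGetD_neg_one l "" hne, h1, PySem.List.pyGetD_natCast,
      List.getD_eq_getElem l "" (by omega), List.getLast_eq_getElem]
  simp only [get_slider_marks, get_slider_marks_alt]
  simp only [hs, ← hk'def, ← hkdef]
  cases access_all with
  | false =>
    simp only [Bool.false_eq_true, if_false]
    rw [PySem.List.foldl_ite_eq_foldl_filter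
        (p := fun p : Int × String => PySem.Int.mod p.1 k' = 0)
        (f := fun (d : PySem.Dict Int (List (String × String))) (p : Int × String) =>
          d.insert p.1 [("label", p.2)])]
    rw [List.filter_congr (q := fun p : Int × String => decide ((k : Int) ∣ p.1))
        (fun x _ => by simp [hdvd x.1])]
    rw [PySem.List.enumerate_eq_map_pyRange l ""]
    rw [hlast]
    congr 1
    apply PySem.Dict.ext
    rw [PySem.List.len_eq, PySem.List.pyRange_zero_nat, pv_pyRange_filter l.length k hk,
        List.filter_map, List.foldl_map, List.foldl_map]
    rw [List.filter_map, List.foldl_map]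
    simp only [Function.comp_def]
  | true =>
    simp only [if_true]
    have hfun : (fun (marks : PySem.Dict Int (List (String × String))) (p : Int × String) =>
          if PySem.Int.mod p.1 k' = 0 then marks.insert p.1 [("label", p.2)]
          else marks.insert p.1 [("label", "")])
        = (fun marks p =>
          marks.insert p.1 (if PySem.Int.mod p.1 k' = 0 then [("label", p.2)] else [("label", "")])) := by
      funext d p
      by_cases h : PySem.Int.mod p.1 k' = 0 <;> simp [h]
    rw [hfun, hlast]
    rw [PySem.List.enumerate_eq_map_pyRange l "", PySem.List.len_eq, PySem.List.pyRange_zero_nat,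
        List.foldl_map, List.foldl_map]
    dsimp only
    have hkI : (0:Int) < (k:Int) := by exact_mod_cast hk
    have hd0 : (List.foldl (fun (d : PySem.Dict Int (List (String × String))) (i : Int) =>
          d.insert i [("label", "")]) PySem.Dict.empty
          (List.map (fun j : Nat => (j : Int)) (List.range l.length))).items
        = (List.range l.length).map (fun i : Nat => ((i : Int), (fun _ : Nat => [("label", "")]) i)) := by
      rw [List.foldl_map,
        PySem.Dict.items_foldl_insert_fresh (List.range l.length) (fun i : Nat => (i : Int))
          (fun _ => [("label", "")]) PySem.Dict.empty (by intro a _; rfl)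
          ((List.nodup_range).map (fun a b h => by exact_mod_cast h))]
      rfl
    have hY := pv_foldl_insert_replace l.length (fun i : Int => [("label", PySem.List.pyGetD l i "")])
        (PySem.List.pyRange 0 (l.length : Int) (k : Int)) _ (fun _ : Nat => [("label", "")])
        (by
          intro m hm
          rw [PySem.List.mem_pyRange_iff_of_pos hkI] at hm
          exact ⟨m.toNat, by omega, by omega⟩)
        hd0
    dsimp only at hY
    have hXY : (List.foldl
          (fun (x : PySem.Dict Int (List (String × String))) (y : Nat) =>
            x.insert ((y : Nat) : Int)
              (if PySem.Int.mod ((y : Nat) : Int) k' = 0 then [("label", PySem.List.pyGetD l ((y : Nat) : Int) "")]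
               else [("label", "")]))
          PySem.Dict.empty (List.range l.length))
        = (List.foldl (fun (d : PySem.Dict Int (List (String × String))) (i : Int) =>
              d.insert i [("label", PySem.List.pyGetD l i "")])
            (List.foldl (fun (d : PySem.Dict Int (List (String × String))) (i : Int) =>
              d.insert i [("label", "")]) PySem.Dict.empty
              (List.map (fun j : Nat => (j : Int)) (List.range l.length)))
            (PySem.List.pyRange 0 (l.length : Int) (k : Int))) := by
      apply PySem.Dict.ext
      rw [hY]
      rw [PySem.Dict.items_foldl_insert_fresh (List.range l.length) (fun i : Nat => (i : Int))
          (fun i : Nat => if PySem.Int.mod (i : Int) k' = 0 then [("label", PySem.List.pyGetD l (i : Int) "")]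
            else [("label", "")])
          PySem.Dict.empty (by intro a _; rfl)
          ((List.nodup_range).map (fun a b h => by exact_mod_cast h))]
      have : PySem.Dict.empty.items = ([] : List (Int × List (String × String))) := rfl
      rw [this, List.nil_append]
      refine List.map_congr_left ?_
      intro i hi
      rw [List.mem_range] at hi
      have hmem : ((i : Int) ∈ PySem.List.pyRange 0 (l.length : Int) (k : Int)) ↔ ((k:Int) ∣ (i:Int)) := by
        rw [PySem.List.mem_pyRange_iff_of_pos hkI]
        constructor
        · rintro ⟨-, -, h⟩; simpa using h
        · intro h; exact ⟨by positivity, by exact_mod_cast hi, by simpa using h⟩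
      by_cases h : PySem.Int.mod (i : Int) k' = 0
      · have hin : (i : Int) ∈ PySem.List.pyRange 0 (l.length : Int) (k : Int) := hmem.2 ((hdvd _).1 h)
        simp [h, hin]
      · have hnin : ¬ (i : Int) ∈ PySem.List.pyRange 0 (l.length : Int) (k : Int) :=
          fun hc => h ((hdvd _).2 (hmem.1 hc))
        simp [h, hnin]
    rw [hXY]

-- ===== VERDICT (by name: the statement is the Claim_ definition above) =====
theorem get_slider_marks_spec : Claim_equal_get_slider_marks := by
  intro strings steps access_all _ hpre
  unfold Spec_get_slider_marks
  cases strings with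
  | none => rfl
  | some l =>
    simp only [Pre_get_slider_marks, Option.elim, decide_eq_true_eq] at hpre
    exact pv_main l steps access_all hpre.1 hpre.2
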